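-- pv_equiv track=rewrite | github.com/altoid/misc_puzzles | py/prime_bits/solution.py | successor_with_more_bits
-- ===== SOURCE A (Python) =====
-- def successor_with_more_bits(n, k, width):
--     """
--     return the smallest value m >= n such that m has an additional b bits.
--     we do this by setting to 1 the least significant b 0 bits.
--
--     if b is 0, return n.
--     if the lowest <width> bits are already set, return None.
--     if we can only set fewer than b bits, return None.
--     """
--
--     if k == 0:
--         return n
--
--     if n == 2 ** width - 1:
--         return None
--
--     mask = 1
--     result = n
--     i = 0
--     while mask < 2 ** width:
--         if mask & n == 0:
--             i += 1
--             result |= mask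
--         if i == k:
--             break
--
--         mask <<= 1
--
--     if i == k:
--         return result
-- ===== SOURCE B (Python) =====
-- def successor_with_more_bits(n, k, width):
--     # Set the k lowest zero bits of n (within the low `width` bits), or None.
--     if k == 0:
--         return n
--     if k < 0:
--         return None
--     result = n
--     for _ in range(k):
--         b = ~result & (result + 1)  # lowest zero bit of result (0 if none)
--         if b == 0 or b >= 2 ** width:
--             return None
--         result |= b
--     return result
-- ===== Notes on version B (the rewrite author's own statement) =====
-- stated objective: alternative
-- what changed: A scans every mask position 1,2,4,... up to 2**width testing each bit of n; B instead runs at most k rounds, each isolating the lowest zero bit of the current result in O(1) with ~result & (result+1), guarding b == 0 (no zero bit, e.g. n == -1) and b >= 2**width.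
import Mathlib
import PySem

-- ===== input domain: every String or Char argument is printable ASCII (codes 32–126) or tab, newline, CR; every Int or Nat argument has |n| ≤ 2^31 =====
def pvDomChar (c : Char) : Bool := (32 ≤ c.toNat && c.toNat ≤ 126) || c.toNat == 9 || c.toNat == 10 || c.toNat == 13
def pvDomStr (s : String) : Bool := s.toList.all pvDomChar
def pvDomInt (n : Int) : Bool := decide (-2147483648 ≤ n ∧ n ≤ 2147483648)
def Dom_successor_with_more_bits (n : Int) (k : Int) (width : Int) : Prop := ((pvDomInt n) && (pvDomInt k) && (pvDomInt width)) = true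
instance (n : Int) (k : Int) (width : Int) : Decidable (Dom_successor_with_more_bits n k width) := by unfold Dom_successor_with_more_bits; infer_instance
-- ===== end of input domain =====

-- B replaces A's bit-by-bit scan of all `width` mask positions by at most k rounds that each
-- isolate the lowest zero bit of the current result with ~result & (result+1) (objective: alternative).

-- Both Pythons compare integers with `2 ** width`.  For width < 0 Python's `2 ** width` is a
-- fraction in (0, 1), so for an integer x ≥ 1 the tests `x < 2**width` / `x >= 2**width` behave
-- exactly as with the bound 1; pow2Bound encodes that (exact for width ≥ 0, bound-1 for width < 0).
def pow2Bound (width : Int) : Int := if 0 ≤ width then ((2 ^ width.toNat : Nat) : Int) else 1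

-- ===== PORT A =====
-- the while loop: state (mask, result, i); fuel width.toNat is enough since mask = 2^t must stay < 2^width
def aLoop (n k bound : Int) : Nat → Int → Int → Int → Int × Int
  | 0, _mask, result, i => (result, i)
  | fuel+1, mask, result, i =>
    if mask < bound then
      let p := if PySem.Int.band mask n = 0 then (PySem.Int.bor result mask, i + 1) else (result, i)
      if p.2 = k then p else aLoop n k bound fuel (mask <<< (1:Nat)) p.1 p.2
    else (result, i)

def successor_with_more_bits (n : Int) (k : Int) (width : Int) : Option Int :=
  if k = 0 then some n
  -- Python's `n == 2 ** width - 1` is False for every int n when width < 0 (RHS is fractional)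
  else if 0 ≤ width ∧ n = pow2Bound width - 1 then none
  else
    let p := aLoop n k (pow2Bound width) width.toNat 1 n 0
    if p.2 = k then some p.1 else none

-- ===== PORT B =====
-- the `for _ in range(k)` loop of Source B
def bStep (width : Int) : Nat → Int → Option Int
  | 0, result => some result
  | m+1, result =>
    let b := PySem.Int.band (Int.not result) (result + 1)
    if b = 0 ∨ pow2Bound width ≤ b then none
    else bStep width m (PySem.Int.bor result b)

def successor_with_more_bits_alt (n : Int) (k : Int) (width : Int) : Option Int :=
  if k = 0 then some n
  else if k < 0 then none
  else bStep width k.toNat n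

-- ===== PRECONDITION & SPEC =====
def Spec_successor_with_more_bits (n : Int) (k : Int) (width : Int) (out : Option Int) : Prop := out = successor_with_more_bits_alt n k width
instance (n : Int) (k : Int) (width : Int) (out : Option Int) : Decidable (Spec_successor_with_more_bits n k width out) := by unfold Spec_successor_with_more_bits; infer_instance

-- ===== CLAIM (what is proved, stated in full; the proofs are below) =====
def Claim_equal_successor_with_more_bits : Prop := ∀ (n : Int) (k : Int) (width : Int), Dom_successor_with_more_bits n k width → Spec_successor_with_more_bits n k width (successor_with_more_bits n k width)

-- ===== LEMMAS AND PROOFS =====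

-- Nat bit toolbox
lemma land_add_ldiff (n : Nat) : ∀ m : Nat, (n &&& m) + Nat.ldiff n m = n := by
  induction n using Nat.binaryRec with
  | zero => intro m; simp [Nat.zero_and, Nat.ldiff, Nat.bitwise_zero_left]
  | bit b n ih =>
    intro m
    rw [← Nat.bit_testBit_zero_shiftRight_one m, Nat.land_bit, Nat.ldiff_bit,
      Nat.bit_val, Nat.bit_val, Nat.bit_val]
    have := ih (m >>> 1)
    cases b <;> cases m.testBit 0 <;> simp <;> omega

lemma sub_and_eq_ldiff (n m : Nat) : n - (n &&& m) = Nat.ldiff n m := by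
  have := land_add_ldiff n m
  omega

lemma mask_and (c m : Nat) (hc : c < 2 ^ m) : (2 ^ m - 1) &&& c = c := by
  apply Nat.eq_of_testBit_eq
  intro i
  rw [Nat.testBit_land, Nat.testBit_two_pow_sub_one]
  by_cases h : i < m
  · simp [h]
  · have : c < 2 ^ i := lt_of_lt_of_le hc (Nat.pow_le_pow_right (by norm_num) (by omega))
    simp [h, Nat.testBit_eq_false_of_lt this]

lemma compl_bit (c m i : Nat) (hc : c < 2 ^ m) (hi : i < m) :
    (2 ^ m - 1 - c).testBit i = !c.testBit i := by
  have h1 : 2 ^ m - 1 - c = 2 ^ m - 1 - ((2 ^ m - 1) &&& c) := by rw [mask_and c m hc]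
  rw [h1, sub_and_eq_ldiff, Nat.testBit_ldiff, Nat.testBit_two_pow_sub_one]
  simp [hi]

-- Int testBit toolbox
lemma tb_ofNat (m i : Nat) : (Int.ofNat m).testBit i = m.testBit i := rfl
lemma tb_negSucc (m i : Nat) : (Int.negSucc m).testBit i = !m.testBit i := rfl
lemma tb_zero (i : Nat) : (0 : Int).testBit i = false := by
  rw [show (0:Int) = Int.ofNat 0 from rfl, tb_ofNat, Nat.zero_testBit]
lemma tb_neg_one (i : Nat) : (-1 : Int).testBit i = true := by
  rw [show (-1:Int) = Int.negSucc 0 from rfl, tb_negSucc, Nat.zero_testBit]; rfl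

lemma int_ext {x y : Int} (h : ∀ i, x.testBit i = y.testBit i) : x = y := by
  cases x with
  | ofNat a =>
    cases y with
    | ofNat b => exact congrArg Int.ofNat (Nat.eq_of_testBit_eq fun i => h i)
    | negSucc b =>
      exfalso
      have hi := h (max a b)
      rw [tb_ofNat, tb_negSucc,
        Nat.testBit_eq_false_of_lt (lt_of_le_of_lt (le_max_left a b) Nat.lt_two_pow_self),
        Nat.testBit_eq_false_of_lt (lt_of_le_of_lt (le_max_right a b) Nat.lt_two_pow_self)] at hi
      simp at hi
  | negSucc a =>
    cases y with
    | ofNat b =>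
      exfalso
      have hi := h (max a b)
      rw [tb_negSucc, tb_ofNat,
        Nat.testBit_eq_false_of_lt (lt_of_le_of_lt (le_max_left a b) Nat.lt_two_pow_self),
        Nat.testBit_eq_false_of_lt (lt_of_le_of_lt (le_max_right a b) Nat.lt_two_pow_self)] at hi
      simp at hi
    | negSucc b =>
      have : a = b := Nat.eq_of_testBit_eq fun i => by
        have hi := h i
        rw [tb_negSucc, tb_negSucc] at hi
        simpa using hi
      rw [this]

lemma tb_not (a : Int) (i : Nat) : (Int.not a).testBit i = !a.testBit i := by
  cases a with
  | ofNat m => rfl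
  | negSucc m =>
    rw [show Int.not (Int.negSucc m) = Int.ofNat m by simp [Int.not], tb_ofNat, tb_negSucc]
    simp

lemma negSucc_nonpos (y : Nat) : ¬ (0:Int) ≤ Int.negSucc y := by
  simp [Int.negSucc_not_nonneg]

lemma band_ofNat_ofNat (x y : Nat) :
    PySem.Int.band (Int.ofNat x) (Int.ofNat y) = Int.ofNat (x &&& y) := by
  unfold PySem.Int.band
  rw [if_pos (show (0:Int) ≤ Int.ofNat x from Int.natCast_nonneg x),
      if_pos (show (0:Int) ≤ Int.ofNat y from Int.natCast_nonneg y)]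
  rfl

lemma band_ofNat_negSucc (x y : Nat) :
    PySem.Int.band (Int.ofNat x) (Int.negSucc y) = Int.ofNat (Nat.ldiff x y) := by
  unfold PySem.Int.band
  rw [if_pos (show (0:Int) ≤ Int.ofNat x from Int.natCast_nonneg x),
      if_neg (negSucc_nonpos y)]
  rw [show (-Int.negSucc y - 1) = (y:Int) by rw [Int.neg_negSucc]; push_cast; ring]
  rw [show (Int.ofNat x).toNat = x from rfl, Int.toNat_natCast, sub_and_eq_ldiff]
  rfl

lemma band_negSucc_ofNat (x y : Nat) :
    PySem.Int.band (Int.negSucc x) (Int.ofNat y) = Int.ofNat (Nat.ldiff y x) := by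
  unfold PySem.Int.band
  rw [if_neg (negSucc_nonpos x), if_pos (show (0:Int) ≤ Int.ofNat y from Int.natCast_nonneg y)]
  rw [show (-Int.negSucc x - 1) = (x:Int) by rw [Int.neg_negSucc]; push_cast; ring]
  rw [show (Int.ofNat y).toNat = y from rfl, Int.toNat_natCast, sub_and_eq_ldiff]
  rfl

lemma band_negSucc_negSucc (x y : Nat) :
    PySem.Int.band (Int.negSucc x) (Int.negSucc y) = Int.negSucc (x ||| y) := by
  unfold PySem.Int.band
  rw [if_neg (negSucc_nonpos x), if_neg (negSucc_nonpos y)]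
  rw [show (-Int.negSucc x - 1) = (x:Int) by rw [Int.neg_negSucc]; push_cast; ring]
  rw [show (-Int.negSucc y - 1) = (y:Int) by rw [Int.neg_negSucc]; push_cast; ring]
  rw [Int.toNat_natCast, Int.toNat_natCast, Int.negSucc_eq]
  ring

lemma bor_ofNat_ofNat (x y : Nat) :
    PySem.Int.bor (Int.ofNat x) (Int.ofNat y) = Int.ofNat (x ||| y) := by
  unfold PySem.Int.bor
  rw [if_pos (show (0:Int) ≤ Int.ofNat x from Int.natCast_nonneg x),
      if_pos (show (0:Int) ≤ Int.ofNat y from Int.natCast_nonneg y)]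
  rfl

lemma bor_ofNat_negSucc (x y : Nat) :
    PySem.Int.bor (Int.ofNat x) (Int.negSucc y) = Int.negSucc (Nat.ldiff y x) := by
  unfold PySem.Int.bor
  rw [if_pos (show (0:Int) ≤ Int.ofNat x from Int.natCast_nonneg x),
      if_neg (negSucc_nonpos y)]
  rw [show (-Int.negSucc y - 1) = (y:Int) by rw [Int.neg_negSucc]; push_cast; ring]
  rw [show (Int.ofNat x).toNat = x from rfl, Int.toNat_natCast, sub_and_eq_ldiff, Int.negSucc_eq]
  ring

lemma bor_negSucc_ofNat (x y : Nat) :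
    PySem.Int.bor (Int.negSucc x) (Int.ofNat y) = Int.negSucc (Nat.ldiff x y) := by
  unfold PySem.Int.bor
  rw [if_neg (negSucc_nonpos x), if_pos (show (0:Int) ≤ Int.ofNat y from Int.natCast_nonneg y)]
  rw [show (-Int.negSucc x - 1) = (x:Int) by rw [Int.neg_negSucc]; push_cast; ring]
  rw [show (Int.ofNat y).toNat = y from rfl, Int.toNat_natCast, sub_and_eq_ldiff, Int.negSucc_eq]
  ring

lemma bor_negSucc_negSucc (x y : Nat) :
    PySem.Int.bor (Int.negSucc x) (Int.negSucc y) = Int.negSucc (x &&& y) := by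
  unfold PySem.Int.bor
  rw [if_neg (negSucc_nonpos x), if_neg (negSucc_nonpos y)]
  rw [show (-Int.negSucc x - 1) = (x:Int) by rw [Int.neg_negSucc]; push_cast; ring]
  rw [show (-Int.negSucc y - 1) = (y:Int) by rw [Int.neg_negSucc]; push_cast; ring]
  rw [Int.toNat_natCast, Int.toNat_natCast, Int.negSucc_eq]
  ring

lemma band_testBit (a b : Int) (i : Nat) :
    (PySem.Int.band a b).testBit i = (a.testBit i && b.testBit i) := by
  cases a with
  | ofNat x =>
    cases b with
    | ofNat y => rw [band_ofNat_ofNat, tb_ofNat, tb_ofNat, tb_ofNat, Nat.testBit_land]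
    | negSucc y =>
      rw [band_ofNat_negSucc, tb_ofNat, Nat.testBit_ldiff, tb_ofNat, tb_negSucc]
  | negSucc x =>
    cases b with
    | ofNat y =>
      rw [band_negSucc_ofNat, tb_ofNat, Nat.testBit_ldiff, tb_ofNat, tb_negSucc, Bool.and_comm]
    | negSucc y =>
      rw [band_negSucc_negSucc, tb_negSucc, Nat.testBit_lor, tb_negSucc, tb_negSucc]
      simp

lemma bor_testBit (a b : Int) (i : Nat) :
    (PySem.Int.bor a b).testBit i = (a.testBit i || b.testBit i) := by
  cases a with
  | ofNat x =>
    cases b with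
    | ofNat y => rw [bor_ofNat_ofNat, tb_ofNat, tb_ofNat, tb_ofNat, Nat.testBit_lor]
    | negSucc y =>
      rw [bor_ofNat_negSucc, tb_negSucc, Nat.testBit_ldiff, tb_negSucc, tb_ofNat]
      cases x.testBit i <;> cases y.testBit i <;> rfl
  | negSucc x =>
    cases b with
    | ofNat y =>
      rw [bor_negSucc_ofNat, tb_negSucc, Nat.testBit_ldiff, tb_negSucc, tb_ofNat]
      cases x.testBit i <;> cases y.testBit i <;> rfl
    | negSucc y =>
      rw [bor_negSucc_negSucc, tb_negSucc, Nat.testBit_land, tb_negSucc, tb_negSucc]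
      cases x.testBit i <;> cases y.testBit i <;> rfl

lemma ofNat_cast (t : Nat) : Int.ofNat t = (t : Int) := rfl

lemma tb_natCast (m i : Nat) : ((m : Int)).testBit i = m.testBit i := rfl

lemma tb_pow (j i : Nat) : ((2:Int) ^ j).testBit i = decide (j = i) := by
  rw [show ((2:Int) ^ j) = ((2 ^ j : Nat) : Int) by push_cast; ring]
  rw [tb_natCast, Nat.testBit_two_pow]

lemma cast_pow_sub_one (j : Nat) : ((2 ^ j - 1 : Nat) : Int) = (2:Int) ^ j - 1 := by
  have := Nat.one_le_two_pow (n := j)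
  push_cast [this]
  ring

lemma tb_pow_sub_one (j i : Nat) : ((2:Int) ^ j - 1).testBit i = decide (i < j) := by
  rw [← cast_pow_sub_one, tb_natCast, Nat.testBit_two_pow_sub_one]

-- testBit of q * 2^m + c  (0 ≤ c < 2^m)
lemma tb_mul_pow_add (q : Int) (c m : Nat) (hc : c < 2 ^ m) (i : Nat) :
    (q * 2 ^ m + (c : Int)).testBit i = if i < m then c.testBit i else q.testBit (i - m) := by
  cases q with
  | ofNat a =>
    rw [show (Int.ofNat a * 2 ^ m + (c : Int)) = ((2 ^ m * a + c : Nat) : Int) by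
      rw [ofNat_cast]; push_cast; ring]
    rw [tb_natCast, Nat.testBit_two_pow_mul_add a hc i]
    rfl
  | negSucc a =>
    have h1 := Nat.one_le_two_pow (n := m)
    have hd : 2 ^ m - 1 - c < 2 ^ m := by omega
    rw [show (Int.negSucc a * 2 ^ m + (c : Int)) = Int.negSucc (2 ^ m * a + (2 ^ m - 1 - c)) by
      rw [Int.negSucc_eq, Int.negSucc_eq]
      push_cast [show c ≤ 2 ^ m - 1 by omega, h1]
      ring]
    rw [tb_negSucc, Nat.testBit_two_pow_mul_add a hd i]
    by_cases h : i < m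
    · simp [h, compl_bit c m i hc h]
    · simp [h, tb_negSucc]

-- the canonical loop state: n with its low j bits forced to 1
def lowOnes (n : Int) (j : Nat) : Int := PySem.Int.bor n ((2:Int) ^ j - 1)

lemma tb_lowOnes (n : Int) (j i : Nat) :
    (lowOnes n j).testBit i = (n.testBit i || decide (i < j)) := by
  rw [lowOnes, bor_testBit, tb_pow_sub_one]

lemma lowOnes_zero (n : Int) : lowOnes n 0 = n := by
  simp [lowOnes, PySem.Int.bor_zero]

lemma lowOnes_succ_of_true (n : Int) (j : Nat) (h : n.testBit j = true) :
    lowOnes n j = lowOnes n (j+1) := by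
  apply int_ext; intro i
  rw [tb_lowOnes, tb_lowOnes]
  by_cases hij : i = j
  · subst hij; simp [h]
  · by_cases h2 : i < j <;> by_cases h3 : i < j + 1 <;> simp [h2, h3] <;> omega

lemma lowOnes_succ_of_false (n : Int) (j : Nat) :
    PySem.Int.bor (lowOnes n j) ((2:Int) ^ j) = lowOnes n (j+1) := by
  apply int_ext; intro i
  rw [bor_testBit, tb_lowOnes, tb_lowOnes, tb_pow]
  by_cases hij : i = j
  · subst hij; simp
  · by_cases h2 : i < j <;> by_cases h3 : i < j + 1 <;> simp [h2, h3] <;> omega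

lemma emod_toNat_lt (n : Int) (m : Nat) : (n % (2:Int) ^ m).toNat < 2 ^ m := by
  have hp : (0:Int) < 2 ^ m := by positivity
  have h2 := Int.emod_lt_of_pos n hp
  have : ((2:Int) ^ m) = ((2 ^ m : Nat) : Int) := by push_cast; ring
  omega

lemma ediv_mul_add_emod (n : Int) (m : Nat) :
    (n / 2 ^ m) * 2 ^ m + (((n % (2:Int) ^ m).toNat : Nat) : Int) = n := by
  have hp : (0:Int) < 2 ^ m := by positivity
  have h1 := Int.emod_nonneg n (ne_of_gt hp)
  have hadd := Int.mul_ediv_add_emod n ((2:Int) ^ m)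
  rw [Int.toNat_of_nonneg h1]
  linarith [hadd]

-- bits of n in terms of its decomposition at position m
lemma tb_of_decomp (n : Int) (m i : Nat) :
    n.testBit i = if i < m then ((n % (2:Int) ^ m).toNat).testBit i
                  else (n / 2 ^ m).testBit (i - m) := by
  conv_lhs => rw [← ediv_mul_add_emod n m]
  exact tb_mul_pow_add _ _ _ (emod_toNat_lt n m) i

-- decomposition of lowOnes when bit j of n is clear
lemma lowOnes_decomp (n : Int) (j : Nat) (h : n.testBit j = false) :
    lowOnes n j = (n / 2 ^ (j+1)) * 2 ^ (j+1) + ((2 ^ j - 1 : Nat) : Int) := by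
  have h1 := Nat.one_le_two_pow (n := j)
  have hc : (2:Nat) ^ j - 1 < 2 ^ (j+1) := by
    have : (2:Nat) ^ (j+1) = 2 * 2 ^ j := by ring
    omega
  apply int_ext; intro i
  rw [tb_lowOnes, tb_mul_pow_add _ _ _ hc]
  by_cases hlt : i < j + 1
  · rw [if_pos hlt, Nat.testBit_two_pow_sub_one]
    by_cases hij : i = j
    · subst hij; simp [h]
    · have h2 : i < j := by omega
      simp [h2]
  · rw [if_neg hlt]
    have h2 : ¬ i < j := by omega
    rw [tb_of_decomp n (j+1) i, if_neg hlt]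
    simp [h2]

-- the B-side step: ~r & (r+1) isolates the lowest zero bit
lemma key1 (n : Int) (j : Nat) (h : n.testBit j = false) :
    PySem.Int.band (Int.not (lowOnes n j)) (lowOnes n j + 1) = (2:Int) ^ j := by
  have h1 := Nat.one_le_two_pow (n := j)
  have hc : (2:Nat) ^ j < 2 ^ (j+1) := by
    have : (2:Nat) ^ (j+1) = 2 * 2 ^ j := by ring
    omega
  have hsucc : lowOnes n j + 1 = (n / 2 ^ (j+1)) * 2 ^ (j+1) + ((2 ^ j : Nat) : Int) := by
    rw [lowOnes_decomp n j h, cast_pow_sub_one]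
    push_cast
    ring
  apply int_ext; intro i
  rw [band_testBit, tb_not, tb_lowOnes, hsucc, tb_mul_pow_add _ _ _ hc, tb_pow]
  by_cases hij : i = j
  · subst hij; simp [h, Nat.testBit_two_pow_self]
  · by_cases hlt : i < j
    · simp [hlt, Ne.symm hij, show i < j + 1 by omega]
    · have h2 : ¬ i < j + 1 := by omega
      have hq : (n / 2 ^ (j+1)).testBit (i - (j+1)) = n.testBit i := by
        have := tb_of_decomp n (j+1) i
        rw [if_neg h2] at this
        exact this.symm
      rw [if_neg h2, hq]
      cases hb : n.testBit i <;> simp [hlt, Ne.symm hij]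

-- KEY2: the lowest-zero value is 0 or 2^p for the first clear bit p ≥ j of n
lemma key2 (n : Int) (j : Nat) :
    PySem.Int.band (Int.not (lowOnes n j)) (lowOnes n j + 1) = 0 ∨
    ∃ p, j ≤ p ∧ n.testBit p = false ∧
      PySem.Int.band (Int.not (lowOnes n j)) (lowOnes n j + 1) = (2:Int) ^ p := by
  by_cases hall : ∀ i, j ≤ i → n.testBit i = true
  · left
    have hr : lowOnes n j = -1 := by
      apply int_ext; intro i
      rw [tb_lowOnes, tb_neg_one]
      by_cases h : i < j
      · simp [h]
      · simp [hall i (by omega)]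
    rw [hr]
    show PySem.Int.band (Int.not (-1)) 0 = 0
    rw [show Int.not (-1) = 0 from rfl, PySem.Int.band_comm, PySem.Int.band_zero]
  · right
    have hex : ∃ i, j ≤ i ∧ n.testBit i = false := by
      by_contra hne
      refine hall (fun i hi => ?_)
      cases hb : n.testBit i
      · exact absurd ⟨i, hi, hb⟩ hne
      · rfl
    classical
    have hp := Nat.find_spec hex
    refine ⟨Nat.find hex, hp.1, hp.2, ?_⟩
    have hsame : lowOnes n j = lowOnes n (Nat.find hex) := by
      apply int_ext; intro i
      rw [tb_lowOnes, tb_lowOnes]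
      by_cases h1 : i < j
      · simp [h1, show i < Nat.find hex by omega]
      · by_cases h2 : i < Nat.find hex
        · have : n.testBit i = true := by
            have hmin := Nat.find_min hex (m := i) h2
            simp only [not_and, Bool.not_eq_false] at hmin
            exact hmin (by omega)
          simp [this]
        · simp [h1, h2]
    rw [hsame]
    exact key1 n (Nat.find hex) hp.2

lemma band_pow_eq_zero_iff (j : Nat) (n : Int) :
    PySem.Int.band ((2:Int) ^ j) n = 0 ↔ n.testBit j = false := by
  constructor
  · intro h
    have := congrArg (fun x => x.testBit j) h
    simp only at this
    rw [band_testBit, tb_pow, tb_zero] at this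
    simpa using this
  · intro h
    apply int_ext; intro i
    rw [band_testBit, tb_pow, tb_zero]
    by_cases hij : j = i
    · subst hij; simp [h]
    · simp [hij]

lemma two_pow_pos (j : Nat) : (0:Int) < 2 ^ j := by positivity

lemma pow2Bound_le (width : Int) (j : Nat) (h : width.toNat ≤ j) :
    pow2Bound width ≤ (2:Int) ^ j := by
  rw [pow2Bound]
  split_ifs with hw
  · have h2 : (2:Nat) ^ width.toNat ≤ 2 ^ j := Nat.pow_le_pow_right (by norm_num) h
    calc ((2 ^ width.toNat : Nat) : Int) ≤ ((2 ^ j : Nat) : Int) := by exact_mod_cast h2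
      _ = (2:Int) ^ j := by push_cast; ring
  · calc (1:Int) = 2 ^ 0 := rfl
      _ ≤ 2 ^ j := pow_le_pow_right₀ (by norm_num) (Nat.zero_le j)

lemma shl_one (j : Nat) : ((2:Int) ^ j) <<< (1:Nat) = 2 ^ (j+1) := by
  rw [Int.shiftLeft_eq]; ring

-- ===== MAIN loop correspondence =====
lemma main_loop (n k width : Int) :
    ∀ (fuel j : Nat) (m : Nat), 0 < m → (m : Int) ≤ k → width.toNat ≤ j + fuel →
    (let p := aLoop n k (pow2Bound width) fuel ((2:Int) ^ j) (lowOnes n j) (k - m);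
     if p.2 = k then some p.1 else none) = bStep width m (lowOnes n j) := by
  intro fuel
  induction fuel with
  | zero =>
    intro j m hm hmk hw
    simp only [aLoop]
    rw [if_neg (show ¬ (k - (m:Int) = k) by omega)]
    obtain ⟨m', rfl⟩ : ∃ m', m = m' + 1 := ⟨m - 1, by omega⟩
    rw [bStep]
    rcases key2 n j with hb | ⟨p, hpj, _, hb⟩
    · rw [hb, if_pos (Or.inl rfl)]
    · rw [hb, if_pos (Or.inr (le_trans (pow2Bound_le width p (by omega))
        (le_refl ((2:Int) ^ p))))]
  | succ fuel ih =>
    intro j m hm hmk hw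
    obtain ⟨m', rfl⟩ : ∃ m', m = m' + 1 := ⟨m - 1, by omega⟩
    simp only [aLoop]
    by_cases hguard : (2:Int) ^ j < pow2Bound width
    · rw [if_pos hguard]
      by_cases hbit : n.testBit j = false
      · -- A sets bit j; B isolates exactly that bit
        rw [if_pos ((band_pow_eq_zero_iff j n).2 hbit)]
        simp only
        rw [bStep, key1 n j hbit,
          if_neg (show ¬ ((2:Int) ^ j = 0 ∨ pow2Bound width ≤ 2 ^ j) by
            rintro (h0 | hle)
            · exact absurd h0 (ne_of_gt (two_pow_pos j))
            · exact absurd hguard (not_lt.2 hle)),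
          lowOnes_succ_of_false]
        have hcnt : k - ((m' + 1 : Nat) : Int) + 1 = k - (m' : Int) := by push_cast; ring
        rw [hcnt]
        cases m' with
        | zero =>
          rw [show k - ((0 : Nat) : Int) = k by push_cast; ring]
          rw [if_pos rfl, if_pos rfl, bStep]
        | succ m'' =>
          have hne : ¬ (k - ((m'' + 1 : Nat) : Int) = k) := by push_cast; omega
          rw [if_neg hne]
          have := ih (j+1) (m''+1) (by omega) (by push_cast at hmk ⊢; omega) (by omega)
          simp only at this
          rw [shl_one]
          exact this
      · -- bit j already set: state unchanged, A advances the mask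
        rw [Bool.not_eq_false] at hbit
        rw [if_neg (show ¬ (PySem.Int.band ((2:Int) ^ j) n = 0) by
          rw [band_pow_eq_zero_iff, hbit]; simp)]
        simp only
        rw [if_neg (show ¬ (k - ((m' + 1 : Nat) : Int) = k) by push_cast; omega)]
        have := ih (j+1) (m'+1) (by omega) hmk (by omega)
        simp only at this
        rw [shl_one, lowOnes_succ_of_true n j hbit]
        exact this
    · rw [if_neg hguard]
      rw [if_neg (show ¬ (k - ((m' + 1 : Nat) : Int) = k) by push_cast; omega)]
      rw [bStep]
      rcases key2 n j with hb | ⟨p, hpj, _, hb⟩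
      · rw [hb, if_pos (Or.inl rfl)]
      · rw [hb, if_pos (Or.inr (le_trans (not_lt.1 hguard)
          (pow_le_pow_right₀ (by norm_num) hpj)))]

-- for k < 0 the loop's counter stays ≥ 0, so A returns none
lemma aLoop_i_nonneg (n k bound : Int) :
    ∀ (fuel : Nat) (mask result i : Int), 0 ≤ i → 0 ≤ (aLoop n k bound fuel mask result i).2 := by
  intro fuel
  induction fuel with
  | zero => intro mask result i hi; simpa [aLoop] using hi
  | succ fuel ih =>
    intro mask result i hi
    simp only [aLoop]
    split_ifs <;> first
      | exact ih _ _ _ (by simp only; omega)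
      | (simp only; omega)

-- n = 2^w - 1 (width ≥ 0): B also returns none, its first lowest-zero already is 2^w
lemma bStep_full (n width : Int) (hw : 0 ≤ width) (hn : n = pow2Bound width - 1) (m : Nat)
    (hm : 0 < m) : bStep width m n = none := by
  obtain ⟨m', rfl⟩ : ∃ m', m = m' + 1 := ⟨m - 1, by omega⟩
  rw [bStep]
  have hrw : n = lowOnes n 0 := (lowOnes_zero n).symm
  rcases key2 n 0 with hb | ⟨p, _, hpb, hb⟩
  · rw [hrw, hb, if_pos (Or.inl rfl)]
  · have hnb : ∀ i, n.testBit i = decide (i < width.toNat) := by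
      intro i
      rw [hn, pow2Bound, if_pos hw,
        show ((2 ^ width.toNat : Nat) : Int) = (2:Int) ^ width.toNat by push_cast; ring,
        tb_pow_sub_one]
    have hple : width.toNat ≤ p := by
      have hx := hnb p
      rw [hpb] at hx
      by_contra hc
      simp [show p < width.toNat by omega] at hx
    rw [hrw, hb, if_pos (Or.inr (pow2Bound_le width p hple))]

-- ===== VERDICT (by name: the statement is the Claim_ definition above) =====
theorem successor_with_more_bits_spec : Claim_equal_successor_with_more_bits := by
  intro n k width _hdom
  unfold Spec_successor_with_more_bits successor_with_more_bits successor_with_more_bits_alt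
  by_cases hk0 : k = 0
  · simp [hk0]
  · rw [if_neg hk0, if_neg hk0]
    by_cases hkneg : k < 0
    · rw [if_pos hkneg]
      by_cases hfull : 0 ≤ width ∧ n = pow2Bound width - 1
      · rw [if_pos hfull]
      · rw [if_neg hfull]
        simp only
        have hge := aLoop_i_nonneg n k (pow2Bound width) width.toNat 1 n 0 le_rfl
        rw [if_neg (by omega)]
    · rw [if_neg hkneg]
      have hk : 0 < k := by omega
      by_cases hfull : 0 ≤ width ∧ n = pow2Bound width - 1
      · rw [if_pos hfull]
        exact (bStep_full n width hfull.1 hfull.2 k.toNat (by omega)).symm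
      · rw [if_neg hfull]
        have := main_loop n k width width.toNat 0 k.toNat (by omega) (by omega) (by omega)
        simp only [lowOnes_zero, pow_zero] at this
        rw [show k - (k.toNat : Int) = 0 by omega] at this
        exact this
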